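-- pv_equiv track=rewrite | github.com/jahirulislammolla/CodeFights | BotChallenges/SpacX/launchSequenceChecker.py | launchSequenceChecker
-- ===== SOURCE A (Python) =====
-- def launchSequenceChecker(systemNames, stepNumbers):
--     x={}
--     for i,j in zip(systemNames,stepNumbers):
--         if i not in x:
--             x[i]=[]
--         x[i]+=[j]
--     for i in x:
--         if x[i]!=sorted(x[i]) or len(set(x[i]))!=len(x[i]):
--             return 0
--     return 1
-- ===== SOURCE B (Python) =====
-- def launchSequenceChecker(systemNames, stepNumbers):
--     last = {}
--     for name, step in zip(systemNames, stepNumbers):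
--         v = last.get(name)
--         if v is not None and step <= v:
--             return 0
--         last[name] = step
--     return 1
-- ===== Notes on version B (the rewrite author's own statement) =====
-- stated objective: faster
-- what changed: Instead of grouping all steps per system, then sorting and set-deduplicating each group, B makes one pass keeping only the last step seen per system and fails as soon as a step is not strictly greater.
import Mathlib
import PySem

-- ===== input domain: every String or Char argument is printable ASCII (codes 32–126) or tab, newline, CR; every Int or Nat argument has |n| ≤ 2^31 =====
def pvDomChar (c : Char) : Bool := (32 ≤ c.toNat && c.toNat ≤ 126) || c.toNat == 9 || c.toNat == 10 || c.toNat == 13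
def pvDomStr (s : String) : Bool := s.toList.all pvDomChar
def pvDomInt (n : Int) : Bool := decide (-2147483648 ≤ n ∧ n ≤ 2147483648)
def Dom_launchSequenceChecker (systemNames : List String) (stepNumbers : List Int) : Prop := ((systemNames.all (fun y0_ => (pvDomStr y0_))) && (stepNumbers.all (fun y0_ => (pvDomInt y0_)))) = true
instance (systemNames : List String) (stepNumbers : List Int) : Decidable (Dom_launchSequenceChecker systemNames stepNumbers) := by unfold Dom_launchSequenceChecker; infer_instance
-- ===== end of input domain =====

-- B replaces A's group-then-sort-and-dedup check by a single pass that keeps only the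
-- last step per system and fails as soon as a step is not strictly greater (objective: faster).

-- ===== PORT A =====
-- body of A's first loop: if i not in x: x[i] = [] ; x[i] += [j]
def lscGroupStep (d : PySem.Dict String (List Int)) (p : String × Int) : PySem.Dict String (List Int) :=
  let d1 := if d.contains p.1 then d else d.insert p.1 []
  d1.insert p.1 (d1.getD p.1 [] ++ [p.2])

-- A's second loop with its early 'return 0'
def lscCheck : List String → PySem.Dict String (List Int) → Int
  | [], _ => 1
  | k :: ks, d =>
    if d.getD k [] ≠ PySem.List.sorted (d.getD k []) (fun v => v) false ∨
       (PySem.Set.ofList (d.getD k [])).length ≠ (d.getD k []).length then 0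
    else lscCheck ks d

def launchSequenceChecker (systemNames : List String) (stepNumbers : List Int) : Int :=
  let x := (systemNames.zip stepNumbers).foldl lscGroupStep PySem.Dict.empty
  lscCheck x.keys x

-- ===== PORT B =====
def lscGo : List (String × Int) → PySem.Dict String Int → Int
  | [], _ => 1
  | (name, step) :: rest, last =>
    match last.get? name with
    | some v => if step ≤ v then 0 else lscGo rest (last.insert name step)
    | none => lscGo rest (last.insert name step)

def launchSequenceChecker_alt (systemNames : List String) (stepNumbers : List Int) : Int :=
  lscGo (systemNames.zip stepNumbers) PySem.Dict.empty

-- ===== PRECONDITION & SPEC =====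
def Spec_launchSequenceChecker (systemNames : List String) (stepNumbers : List Int) (out : Int) : Prop := out = launchSequenceChecker_alt systemNames stepNumbers
instance (systemNames : List String) (stepNumbers : List Int) (out : Int) : Decidable (Spec_launchSequenceChecker systemNames stepNumbers out) := by unfold Spec_launchSequenceChecker; infer_instance

-- ===== CLAIM (what is proved, stated in full; the proofs are below) =====
def Claim_equal_launchSequenceChecker : Prop := ∀ (systemNames : List String) (stepNumbers : List Int), Dom_launchSequenceChecker systemNames stepNumbers → Spec_launchSequenceChecker systemNames stepNumbers (launchSequenceChecker systemNames stepNumbers)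

-- ===== LEMMAS AND PROOFS =====

-- the subsequence of steps belonging to system k inside a zipped list
def lscGroupOf (l : List (String × Int)) (k : String) : List Int :=
  (l.filter (fun p => p.1 == k)).map Prod.snd

theorem lscGroupOf_nil (k : String) : lscGroupOf [] k = [] := rfl

theorem lscGroupOf_cons (p : String × Int) (l : List (String × Int)) (k : String) :
    lscGroupOf (p :: l) k = if p.1 = k then p.2 :: lscGroupOf l k else lscGroupOf l k := by
  simp only [lscGroupOf, List.filter_cons]
  by_cases h : p.1 = k <;> simp [h]

theorem lscGroupStep_eq_modify (d : PySem.Dict String (List Int)) (p : String × Int) :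
    lscGroupStep d p = d.modify p.1 [] (· ++ [p.2]) := by
  unfold lscGroupStep
  by_cases h : d.contains p.1 = true
  · simp only [h, if_true]; rfl
  · simp only [Bool.not_eq_true] at h
    simp only [h, Bool.false_eq_true, if_false]
    rw [PySem.Dict.insert_insert_self]
    show _ = d.insert p.1 (d.getD p.1 [] ++ [p.2])
    rw [PySem.Dict.getD_insert_self, PySem.Dict.getD_of_not_contains d [] h]

theorem lscFoldl_eq (l : List (String × Int)) :
    l.foldl lscGroupStep PySem.Dict.empty
      = l.foldl (fun d p => d.modify p.1 [] (· ++ [p.2])) PySem.Dict.empty := by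
  have : lscGroupStep = fun d p => d.modify p.1 [] (· ++ [p.2]) :=
    funext fun d => funext fun p => lscGroupStep_eq_modify d p
  rw [this]

theorem lscGetD (l : List (String × Int)) (k : String) :
    ((l.foldl lscGroupStep PySem.Dict.empty).getD k []) = lscGroupOf l k := by
  rw [lscFoldl_eq]
  simpa [lscGroupOf] using PySem.Dict.getD_foldl_modify_append l PySem.Dict.empty k

theorem lscKeys_mem (l : List (String × Int)) (k : String) :
    k ∈ (l.foldl lscGroupStep PySem.Dict.empty).keys ↔ k ∈ l.map Prod.fst := by
  rw [lscFoldl_eq]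
  have h2 : (l.foldl (fun d p => d.modify p.1 [] (· ++ [p.2])) PySem.Dict.empty).keys
      = PySem.Set.update (PySem.Dict.empty : PySem.Dict String (List Int)).keys (l.map Prod.fst) :=
    PySem.Dict.keys_foldl_insert_key l Prod.fst
      (fun (d : PySem.Dict String (List Int)) (x : String × Int) => d.getD x.1 [] ++ [x.2])
      PySem.Dict.empty
  rw [h2]
  simp only [PySem.Dict.keys_empty, PySem.Set.update_nil_left]
  exact PySem.Set.mem_ofList (l.map Prod.fst) k

theorem lscGroupOf_eq_nil_of_not_mem (l : List (String × Int)) (k : String)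
    (h : k ∉ l.map Prod.fst) : lscGroupOf l k = [] := by
  unfold lscGroupOf
  rw [List.filter_eq_nil_iff.mpr, List.map_nil]
  intro p hp
  simp only [beq_iff_eq]
  intro e
  exact h (List.mem_map.mpr ⟨p, hp, e⟩)

theorem ofList_length_eq_iff_nodup (g : List Int) :
    (PySem.Set.ofList g).length = g.length ↔ g.Nodup := by
  induction g using List.reverseRecOn with
  | nil => simp [PySem.Set.ofList_nil]
  | append_singleton xs x ih =>
    rw [PySem.Set.ofList_append_singleton]
    by_cases hx : x ∈ xs
    · rw [PySem.Set.add_of_mem ((PySem.Set.mem_ofList _ _).mpr hx)]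
      have hle := PySem.Set.length_ofList_le (xs := xs)
      simp only [List.length_append, List.length_cons, List.length_nil, List.nodup_append]
      constructor
      · intro h; omega
      · rintro ⟨-, -, hdis⟩
        exact absurd rfl (hdis x hx x (List.mem_singleton.mpr rfl))
    · rw [PySem.Set.add_of_not_mem (fun hm => hx ((PySem.Set.mem_ofList _ _).mp hm))]
      simp only [List.length_append, List.length_cons, List.length_nil]
      rw [List.nodup_append]
      constructor
      · intro h
        refine ⟨ih.mp (by omega), List.nodup_singleton x, ?_⟩
        intro a ha b hb
        rw [List.mem_singleton] at hb
        subst hb; intro e; exact hx (e ▸ ha)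
      · rintro ⟨hn, -, -⟩
        rw [ih.mpr hn]

theorem group_cond_iff (g : List Int) :
    (g = PySem.List.sorted g (fun v => v) false ∧ (PySem.Set.ofList g).length = g.length)
      ↔ g.Pairwise (· < ·) := by
  rw [ofList_length_eq_iff_nodup]
  constructor
  · rintro ⟨hs, hn⟩
    have hp : g.Pairwise (fun a b => a ≤ b) := by
      rw [hs]; exact PySem.List.sorted_pairwise g (fun v => v) 
    have := List.Pairwise.and hp hn
    exact this.imp (fun h => lt_of_le_of_ne h.1 h.2)
  · intro h
    refine ⟨(PySem.List.sorted_eq_self_of_pairwise g (fun v => v)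
        (h.imp le_of_lt)).symm, h.imp ne_of_lt⟩

theorem lscCheck_eq_one_iff (ks : List String) (d : PySem.Dict String (List Int)) :
    lscCheck ks d = 1 ↔ ∀ k ∈ ks,
      d.getD k [] = PySem.List.sorted (d.getD k []) (fun v => v) false ∧
      (PySem.Set.ofList (d.getD k [])).length = (d.getD k []).length := by
  induction ks with
  | nil => simp [lscCheck]
  | cons k ks ih =>
    unfold lscCheck
    split_ifs with h
    · simp only [List.mem_cons]
      constructor
      · intro he; exact absurd he (by norm_num)
      · intro hall
        rcases h with h | h
        · exact absurd (hall k (Or.inl rfl)).1 h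
        · exact absurd (hall k (Or.inl rfl)).2 h
    · push_neg at h
      rw [ih]
      simp only [List.mem_cons]
      constructor
      · intro hall k' hk'
        rcases hk' with rfl | hk'
        · exact h
        · exact hall k' hk'
      · intro hall k' hk'; exact hall k' (Or.inr hk')

theorem lscCheck_zero_or_one (ks : List String) (d : PySem.Dict String (List Int)) :
    lscCheck ks d = 0 ∨ lscCheck ks d = 1 := by
  induction ks with
  | nil => right; rfl
  | cons k ks ih => unfold lscCheck; split_ifs <;> simp [ih]

theorem lscGo_eq_one_iff (l : List (String × Int)) (last : PySem.Dict String Int) :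
    lscGo l last = 1 ↔ ∀ k,
      List.IsChain (· < ·)
        ((match last.get? k with | some v => [v] | none => []) ++ lscGroupOf l k) := by
  induction l generalizing last with
  | nil =>
    simp only [lscGo, lscGroupOf_nil, List.append_nil]
    constructor
    · intro _ k
      cases last.get? k <;> simp
    · intro _; trivial
  | cons p rest ih =>
    obtain ⟨i, j⟩ := p
    show (match last.get? i with
      | some v => if j ≤ v then 0 else lscGo rest (last.insert i j)
      | none => lscGo rest (last.insert i j)) = 1 ↔ _
    have hgrp : ∀ k, lscGroupOf ((i, j) :: rest) k
        = if i = k then j :: lscGroupOf rest k else lscGroupOf rest k := fun k =>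
      lscGroupOf_cons (i, j) rest k
    cases hv : last.get? i with
    | some v =>
      by_cases hj : j ≤ v
      · simp only [hj, if_true]
        constructor
        · intro he; exact absurd he (by norm_num)
        · intro hall
          have := hall i
          rw [hgrp i, if_pos rfl, hv] at this
          simp only [List.singleton_append] at this
          rw [List.isChain_cons_cons] at this
          omega
      · simp only [hj, if_false]
        rw [ih]
        constructor
        · intro hall k
          have := hall k
          by_cases hk : i = k
          · subst hk
            rw [PySem.Dict.get?_insert_self] at this
            rw [hgrp i, if_pos rfl, hv]
            simp only [List.singleton_append] at this ⊢
            rw [List.isChain_cons_cons]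
            exact ⟨by omega, this⟩
          · rw [PySem.Dict.get?_insert_of_ne last j (Ne.symm hk)] at this
            rw [hgrp k, if_neg hk]
            exact this
        · intro hall k
          have := hall k
          by_cases hk : i = k
          · subst hk
            rw [hgrp i, if_pos rfl, hv] at this
            rw [PySem.Dict.get?_insert_self]
            simp only [List.singleton_append] at this ⊢
            rw [List.isChain_cons_cons] at this
            exact this.2
          · rw [hgrp k, if_neg hk] at this
            rw [PySem.Dict.get?_insert_of_ne last j (Ne.symm hk)]
            exact this
    | none =>
      rw [ih]
      constructor
      · intro hall k
        have := hall k
        by_cases hk : i = k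
        · subst hk
          rw [PySem.Dict.get?_insert_self] at this
          rw [hgrp i, if_pos rfl, hv]
          simpa using this
        · rw [PySem.Dict.get?_insert_of_ne last j (Ne.symm hk)] at this
          rw [hgrp k, if_neg hk]
          exact this
      · intro hall k
        have := hall k
        by_cases hk : i = k
        · subst hk
          rw [hgrp i, if_pos rfl, hv] at this
          rw [PySem.Dict.get?_insert_self]
          simpa using this
        · rw [hgrp k, if_neg hk] at this
          rw [PySem.Dict.get?_insert_of_ne last j (Ne.symm hk)]
          exact this

theorem lscGo_zero_or_one (l : List (String × Int)) (last : PySem.Dict String Int) :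
    lscGo l last = 0 ∨ lscGo l last = 1 := by
  induction l generalizing last with
  | nil => right; rfl
  | cons p rest ih =>
    obtain ⟨i, j⟩ := p
    rw [show lscGo ((i, j) :: rest) last
        = (match last.get? i with
           | some v => if j ≤ v then (0 : Int) else lscGo rest (last.insert i j)
           | none => lscGo rest (last.insert i j)) from rfl]
    cases last.get? i with
    | some v =>
      by_cases hj : j ≤ v
      · simp [hj]
      · simpa [hj] using ih (last.insert i j)
    | none => simpa using ih (last.insert i j)

theorem A_eq_one_iff (ns : List String) (ss : List Int) :
    launchSequenceChecker ns ss = 1 ↔ ∀ k, (lscGroupOf (ns.zip ss) k).Pairwise (· < ·) := by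
  unfold launchSequenceChecker
  rw [lscCheck_eq_one_iff]
  constructor
  · intro hall k
    by_cases hk : k ∈ ((ns.zip ss).foldl lscGroupStep PySem.Dict.empty).keys
    · have := hall k hk
      rw [lscGetD] at this
      exact (group_cond_iff _).mp this
    · rw [lscGroupOf_eq_nil_of_not_mem _ _ (fun hm => hk ((lscKeys_mem _ _).mpr hm))]
      exact List.Pairwise.nil
  · intro hall k _
    rw [lscGetD]
    exact (group_cond_iff _).mpr (hall k)

theorem B_eq_one_iff (ns : List String) (ss : List Int) :
    launchSequenceChecker_alt ns ss = 1 ↔ ∀ k, (lscGroupOf (ns.zip ss) k).Pairwise (· < ·) := by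
  unfold launchSequenceChecker_alt
  rw [lscGo_eq_one_iff]
  constructor
  · intro hall k
    have := hall k
    rw [PySem.Dict.get?_empty] at this
    simpa [List.isChain_iff_pairwise] using this
  · intro hall k
    rw [PySem.Dict.get?_empty]
    simpa [List.isChain_iff_pairwise] using hall k

-- ===== VERDICT (by name: the statement is the Claim_ definition above) =====
theorem launchSequenceChecker_spec : Claim_equal_launchSequenceChecker := by
  intro ns ss _
  unfold Spec_launchSequenceChecker
  by_cases h : ∀ k, (lscGroupOf (ns.zip ss) k).Pairwise (· < ·)
  · rw [(A_eq_one_iff ns ss).mpr h, (B_eq_one_iff ns ss).mpr h]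
  · have hA : launchSequenceChecker ns ss = 0 := by
      rcases lscCheck_zero_or_one ((ns.zip ss).foldl lscGroupStep PySem.Dict.empty).keys
          ((ns.zip ss).foldl lscGroupStep PySem.Dict.empty) with h0 | h1
      · exact h0
      · exact absurd ((A_eq_one_iff ns ss).mp h1) h
    have hB : launchSequenceChecker_alt ns ss = 0 := by
      rcases lscGo_zero_or_one (ns.zip ss) PySem.Dict.empty with h0 | h1
      · exact h0
      · exact absurd ((B_eq_one_iff ns ss).mp h1) h
    rw [hA, hB]
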